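-- pv_equiv track=rewrite | github.com/diegover2002-cmyk/lolnotifier-bot | tests/functional/telegram_reporting.py | format_test_report
-- ===== SOURCE A (Python) =====
-- from typing import Any
--
-- STATUS_EMOJIS = {
--     "PASS": "✅",
--     "FAIL": "❌",
--     "WARN": "⚠️",
-- }
--
-- def format_test_report(
--     test_user: str,
--     results: list[dict[str, Any]],
-- ) -> str:
--     passed = sum(1 for result in results if result.get("status") == "PASS")
--     failed = sum(1 for result in results if result.get("status") == "FAIL")
--     warned = sum(1 for result in results if result.get("status") == "WARN")
--
--     lines = [
--         "Riot Bot Test Report",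
--         f"User: {test_user}",
--         "",
--     ]
--
--     for result in results:
--         status = result.get("status", "WARN")
--         emoji = STATUS_EMOJIS.get(status, STATUS_EMOJIS["WARN"])
--         name = result.get("name", "Unnamed test")
--         details = result.get("details", "")
--         lines.append(f"{emoji} {name}: {status} - {details}")
--
--     lines.extend(
--         [
--             "",
--             "Summary",
--             f"Passed: {passed}",
--             f"Failed: {failed}",
--             f"Warn: {warned}",
--         ]
--     )
--
--     return "\n".join(lines)
-- ===== SOURCE B (Python) =====
-- # Single pass: counters and lines built in one loop over results (decomposition change; same output).
-- STATUS_EMOJIS = {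
--     "PASS": "✅",
--     "FAIL": "❌",
--     "WARN": "⚠️",
-- }
--
-- def format_test_report(test_user, results):
--     passed = failed = warned = 0
--     lines = ["Riot Bot Test Report", f"User: {test_user}", ""]
--     for result in results:
--         raw = result.get("status")
--         if raw == "PASS":
--             passed += 1
--         elif raw == "FAIL":
--             failed += 1
--         elif raw == "WARN":
--             warned += 1
--         status = "WARN" if raw is None else raw
--         emoji = STATUS_EMOJIS.get(status, "⚠️")
--         name = result.get("name", "Unnamed test")
--         details = result.get("details", "")
--         lines.append(f"{emoji} {name}: {status} - {details}")
--     lines.extend(["", "Summary", f"Passed: {passed}", f"Failed: {failed}", f"Warn: {warned}"])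
--     return "\n".join(lines)
-- ===== Notes on version B (the rewrite author's own statement) =====
-- stated objective: simpler
-- what changed: Replaces A's three separate counting passes plus a formatting loop with a single loop that increments the matching counter (on the undefaulted status) and appends the formatted line at once.
import Mathlib
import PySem

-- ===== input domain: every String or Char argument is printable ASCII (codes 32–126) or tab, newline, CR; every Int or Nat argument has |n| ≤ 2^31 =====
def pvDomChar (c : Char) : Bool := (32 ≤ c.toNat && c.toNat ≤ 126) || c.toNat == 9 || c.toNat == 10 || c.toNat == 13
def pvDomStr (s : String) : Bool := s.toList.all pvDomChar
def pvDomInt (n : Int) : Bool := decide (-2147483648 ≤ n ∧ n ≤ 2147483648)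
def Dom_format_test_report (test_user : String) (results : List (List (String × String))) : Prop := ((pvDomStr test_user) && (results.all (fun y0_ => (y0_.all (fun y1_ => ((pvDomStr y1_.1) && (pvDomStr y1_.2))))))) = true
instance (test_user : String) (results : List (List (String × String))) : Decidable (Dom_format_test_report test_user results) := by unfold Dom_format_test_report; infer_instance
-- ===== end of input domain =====

-- B replaces A's three counting passes + formatting loop by one loop maintaining the counters and the lines (simpler decomposition; same output).

-- ===== PORT A =====
def STATUS_EMOJIS : PySem.Dict String String :=
  PySem.Dict.ofList [("PASS", "✅"), ("FAIL", "❌"), ("WARN", "⚠️")]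

-- dict.get on the input association list: first match (type-convention lookup)
def pvGet (r : List (String × String)) (k : String) : Option String :=
  List.lookup k r

def format_test_report (test_user : String) (results : List (List (String × String))) : String :=
  let passed : Int := results.foldl (fun n r => if pvGet r "status" = some "PASS" then n + 1 else n) 0
  let failed : Int := results.foldl (fun n r => if pvGet r "status" = some "FAIL" then n + 1 else n) 0
  let warned : Int := results.foldl (fun n r => if pvGet r "status" = some "WARN" then n + 1 else n) 0
  let lines : List String := ["Riot Bot Test Report", "User: " ++ test_user, ""]
  let lines := results.foldl (fun (ls : List String) r =>
    let status := (pvGet r "status").getD "WARN"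
    let emoji := STATUS_EMOJIS.getD status (STATUS_EMOJIS.getD "WARN" "⚠️")  -- STATUS_EMOJIS["WARN"] (present, never defaults)
    let name := (pvGet r "name").getD "Unnamed test"
    let details := (pvGet r "details").getD ""
    ls ++ [emoji ++ " " ++ name ++ ": " ++ status ++ " - " ++ details]) lines
  let lines := lines ++ ["", "Summary",
    "Passed: " ++ PySem.Int.toStr passed,
    "Failed: " ++ PySem.Int.toStr failed,
    "Warn: " ++ PySem.Int.toStr warned]
  PySem.Str.join "\n" lines

-- ===== PORT B =====
def format_test_report_alt (test_user : String) (results : List (List (String × String))) : String :=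
  let st : Int × Int × Int × List String :=
    results.foldl (fun (acc : Int × Int × Int × List String) r =>
      let (passed, failed, warned, ls) := acc
      let raw := List.lookup "status" r
      let passed := if raw = some "PASS" then passed + 1 else passed
      let failed := if raw ≠ some "PASS" ∧ raw = some "FAIL" then failed + 1 else failed
      let warned := if raw ≠ some "PASS" ∧ raw ≠ some "FAIL" ∧ raw = some "WARN" then warned + 1 else warned
      let status := match raw with | none => "WARN" | some s => s
      let emoji := STATUS_EMOJIS.getD status "⚠️"
      let name := (List.lookup "name" r).getD "Unnamed test"
      let details := (List.lookup "details" r).getD ""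
      (passed, failed, warned, ls ++ [emoji ++ " " ++ name ++ ": " ++ status ++ " - " ++ details]))
      (0, 0, 0, ["Riot Bot Test Report", "User: " ++ test_user, ""])
  let (passed, failed, warned, ls) := st
  PySem.Str.join "\n" (ls ++ ["", "Summary",
    "Passed: " ++ PySem.Int.toStr passed,
    "Failed: " ++ PySem.Int.toStr failed,
    "Warn: " ++ PySem.Int.toStr warned])

-- ===== PRECONDITION & SPEC =====
def Spec_format_test_report (test_user : String) (results : List (List (String × String))) (out : String) : Prop := out = format_test_report_alt test_user results
instance (test_user : String) (results : List (List (String × String))) (out : String) : Decidable (Spec_format_test_report test_user results out) := by unfold Spec_format_test_report; infer_instance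

-- ===== CLAIM (what is proved, stated in full; the proofs are below) =====
def Claim_equal_format_test_report : Prop := ∀ (test_user : String) (results : List (List (String × String))), Dom_format_test_report test_user results → Spec_format_test_report test_user results (format_test_report test_user results)

-- ===== LEMMAS AND PROOFS =====

-- A's counting pass equals an initial value plus a countP
theorem countA_eq (results : List (List (String × String))) (s : String) (n0 : Int) :
    results.foldl (fun n r => if pvGet r "status" = some s then n + 1 else n) n0
      = n0 + (results.countP (fun r => List.lookup "status" r = some s) : Int) := by
  induction results generalizing n0 with
  | nil => simp
  | cons r rs ih =>
      simp only [List.foldl_cons, List.countP_cons, pvGet] at ih ⊢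
      rw [ih]
      by_cases h : List.lookup "status" r = some s <;> simp [h] <;> omega

def pvLine (r : List (String × String)) : String :=
  let status := (List.lookup "status" r).getD "WARN"
  STATUS_EMOJIS.getD status (STATUS_EMOJIS.getD "WARN" "⚠️") ++ " "
    ++ (List.lookup "name" r).getD "Unnamed test" ++ ": " ++ status ++ " - "
    ++ (List.lookup "details" r).getD ""

theorem linesA_eq (results : List (List (String × String))) (ls : List String) :
    results.foldl (fun (ls : List String) r =>
      let status := (pvGet r "status").getD "WARN"
      let emoji := STATUS_EMOJIS.getD status (STATUS_EMOJIS.getD "WARN" "⚠️")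
      let name := (pvGet r "name").getD "Unnamed test"
      let details := (pvGet r "details").getD ""
      ls ++ [emoji ++ " " ++ name ++ ": " ++ status ++ " - " ++ details]) ls
    = ls ++ results.map pvLine := by
  induction results generalizing ls with
  | nil => simp
  | cons r rs ih =>
      simp only [List.foldl_cons]
      rw [ih]
      simp [pvLine, pvGet]

theorem warnDefault_eq : STATUS_EMOJIS.getD "WARN" "⚠️" = "⚠️" := by decide

-- B's single fold, characterised: counters add countP's, lines get the mapped block appended
theorem foldB_eq (results : List (List (String × String))) (p f w : Int) (ls : List String) :
    results.foldl (fun (acc : Int × Int × Int × List String) r =>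
      let (passed, failed, warned, ls) := acc
      let raw := List.lookup "status" r
      let passed := if raw = some "PASS" then passed + 1 else passed
      let failed := if raw ≠ some "PASS" ∧ raw = some "FAIL" then failed + 1 else failed
      let warned := if raw ≠ some "PASS" ∧ raw ≠ some "FAIL" ∧ raw = some "WARN" then warned + 1 else warned
      let status := match raw with | none => "WARN" | some s => s
      let emoji := STATUS_EMOJIS.getD status "⚠️"
      let name := (List.lookup "name" r).getD "Unnamed test"
      let details := (List.lookup "details" r).getD ""
      (passed, failed, warned, ls ++ [emoji ++ " " ++ name ++ ": " ++ status ++ " - " ++ details]))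
      (p, f, w, ls)
    = (p + (results.countP (fun r => List.lookup "status" r = some "PASS") : Int),
       f + (results.countP (fun r => List.lookup "status" r = some "FAIL") : Int),
       w + (results.countP (fun r => List.lookup "status" r = some "WARN") : Int),
       ls ++ results.map pvLine) := by
  induction results generalizing p f w ls with
  | nil => simp
  | cons r rs ih =>
      simp only [List.foldl_cons, List.countP_cons, List.map_cons]
      rw [ih]
      simp only [Prod.mk.injEq]
      refine ⟨?_, ?_, ?_, ?_⟩
      · by_cases h : List.lookup "status" r = some "PASS" <;> simp [h] <;> omega
      · by_cases h : List.lookup "status" r = some "FAIL"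
        · have hne : List.lookup "status" r ≠ some "PASS" := by simp [h]
          simp [h] ; omega
        · simp [h]
      · by_cases h : List.lookup "status" r = some "WARN"
        · have hp : List.lookup "status" r ≠ some "PASS" := by simp [h]
          have hf : List.lookup "status" r ≠ some "FAIL" := by simp [h]
          simp [h] ; omega
        · simp [h]
      · have hline : (STATUS_EMOJIS.getD
              (match List.lookup "status" r with | none => "WARN" | some s => s) "⚠️" ++ " "
            ++ (List.lookup "name" r).getD "Unnamed test" ++ ": "
            ++ (match List.lookup "status" r with | none => "WARN" | some s => s) ++ " - "
            ++ (List.lookup "details" r).getD "") = pvLine r := by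
          rcases h : List.lookup "status" r with _ | s <;>
            simp [pvLine, h, warnDefault_eq]
        simp [hline]

-- ===== VERDICT (by name: the statement is the Claim_ definition above) =====
theorem format_test_report_spec : Claim_equal_format_test_report := by
  intro test_user results _
  unfold Spec_format_test_report format_test_report format_test_report_alt
  simp only [countA_eq, linesA_eq, foldB_eq]
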